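-- pv_equiv track=rewrite | github.com/Kwansh/Security-Situational-Awareness | src/utils/ip_geo.py | _iter_forwarded_ips
-- ===== SOURCE A (Python) =====
-- from typing import Any, Dict, Iterable, Mapping, Optional
--
-- def _iter_forwarded_ips(value: str) -> Iterable[str]:
--     # RFC 7239: Forwarded: for=192.0.2.60;proto=http;by=203.0.113.43
--     for segment in value.split(","):
--         for part in segment.split(";"):
--             piece = part.strip()
--             if not piece.lower().startswith("for="):
--                 continue
--             raw = piece.split("=", 1)[1].strip().strip('"')
--             yield raw
-- ===== SOURCE B (Python) =====
-- def _iter_forwarded_ips(value: str):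
--     # RFC 7239 Forwarded header, parsed by a single character-level scan:
--     # a streaming state machine accumulates the current token and flushes it
--     # at every ',' or ';' (a sentinel ',' flushes the last token); a flushed
--     # token is emitted when its first four stripped chars are "for=" (any case).
--     token = []
--     for ch in value + ",":
--         if ch == "," or ch == ";":
--             piece = "".join(token).strip()
--             token = []
--             if piece[:4].lower() == "for=":
--                 yield piece[4:].strip().strip('"')
--         else:
--             token.append(ch)
-- ===== Notes on version B (the rewrite author's own statement) =====
-- stated objective: alternative
-- what changed: Replaces A's nested str.split loops with a single character-level streaming state machine (a token accumulator flushed at each delimiter, with a sentinel delimiter appended) and replaces the startswith/maxsplit-split pair with direct four-character slicing of the token.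
import Mathlib
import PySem

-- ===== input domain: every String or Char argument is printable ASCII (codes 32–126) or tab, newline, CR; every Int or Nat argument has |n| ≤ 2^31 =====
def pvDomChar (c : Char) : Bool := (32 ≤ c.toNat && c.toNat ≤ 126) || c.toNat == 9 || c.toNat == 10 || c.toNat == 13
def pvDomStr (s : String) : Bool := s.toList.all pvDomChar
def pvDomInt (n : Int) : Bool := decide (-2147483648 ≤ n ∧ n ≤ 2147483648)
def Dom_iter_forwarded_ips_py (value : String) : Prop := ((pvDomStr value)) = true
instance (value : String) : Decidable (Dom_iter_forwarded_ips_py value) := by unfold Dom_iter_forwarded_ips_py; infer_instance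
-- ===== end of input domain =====

-- B parses the header with a single character-level scan (a token accumulator flushed at each ','
-- or ';', with a sentinel delimiter) and direct piece[:4]/piece[4:] slicing, instead of A's nested
-- str.split loops with startswith + split('=',1); alternative decomposition, same cost.


-- ===== PORT A =====
-- literal port of A: for each comma segment, for each semicolon part, strip, test for=, extract.
-- both splits use PySem.Str.split? with a nonempty separator, so '.getD []' only discharges the
-- (unreachable) none; 'piece.split("=",1)[1]' is PySem.List.pyGet? at 1 ('.getD ""' unreachable:
-- piece starts with "for=", so the split has a second element).
def iter_forwarded_ips_py (value : String) : List String :=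
  ((PySem.Str.split? value ",").getD []).foldl (fun acc segment =>
    ((PySem.Str.split? segment ";").getD []).foldl (fun acc part =>
      let piece := PySem.Str.strip part
      if !(PySem.Str.startswith (PySem.Str.lower piece) "for=") then acc
      else
        let raw := PySem.Str.stripChars
          (PySem.Str.strip ((PySem.List.pyGet?
            ((PySem.Str.splitMax? piece "=" 1).getD []) 1).getD "")) "\""
        acc ++ [raw]) acc) []

-- ===== PORT B =====
-- port of B: one fold over the characters of value + "," (the sentinel flushes the last token);
-- state = (current token chars, output so far); 'ch in ",;"' is the two-char test, '"".join(token)'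
-- is String.ofList, piece[:4] / piece[4:] are PySem.Str.slice.
def iter_forwarded_ips_py_alt (value : String) : List String :=
  ((value.toList ++ [',']).foldl (fun (st : List Char × List String) ch =>
    if ch == ',' || ch == ';' then
      let piece := PySem.Str.strip (String.ofList st.1)
      ([],
        if PySem.Str.lower (PySem.Str.slice piece none (some 4)) == "for=" then
          st.2 ++ [PySem.Str.stripChars (PySem.Str.strip (PySem.Str.slice piece (some 4) none)) "\""]
        else st.2)
    else (st.1 ++ [ch], st.2)) ([], [])).2

-- ===== PRECONDITION & SPEC =====
def Spec_iter_forwarded_ips_py (value : String) (out : List String) : Prop := out = iter_forwarded_ips_py_alt value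
instance (value : String) (out : List String) : Decidable (Spec_iter_forwarded_ips_py value out) := by unfold Spec_iter_forwarded_ips_py; infer_instance

-- ===== CLAIM (what is proved, stated in full; the proofs are below) =====
def Claim_equal_iter_forwarded_ips_py : Prop := ∀ (value : String), Dom_iter_forwarded_ips_py value → Spec_iter_forwarded_ips_py value (iter_forwarded_ips_py value)

-- ===== LEMMAS AND PROOFS =====

-- apply f to the head of a list (identity on [])
def pvMapHead (f : List Char → List Char) : List (List Char) → List (List Char)
  | [] => []
  | x :: xs => f x :: xs

-- split a char list at every char satisfying p: the pure spec of chained single-char str.splits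
def pvSplitP (p : Char → Bool) : List Char → List (List Char)
  | [] => [[]]
  | c :: cs => if p c then [] :: pvSplitP p cs else pvMapHead (c :: ·) (pvSplitP p cs)

def pvDelim (c : Char) : Bool := c == ',' || c == ';'

-- B's per-token emission (definitionally B's flush branch)
def pvEmitB (tok : List Char) : List String :=
  let piece := PySem.Str.strip (String.ofList tok)
  if PySem.Str.lower (PySem.Str.slice piece none (some 4)) == "for=" then
    [PySem.Str.stripChars (PySem.Str.strip (PySem.Str.slice piece (some 4) none)) "\""]
  else []

-- A's per-token emission (definitionally A's inner-loop body, as an append)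
def pvEmitA (part : String) : List String :=
  let piece := PySem.Str.strip part
  if !(PySem.Str.startswith (PySem.Str.lower piece) "for=") then []
  else
    [PySem.Str.stripChars
      (PySem.Str.strip ((PySem.List.pyGet?
        ((PySem.Str.splitMax? piece "=" 1).getD []) 1).getD "")) "\""]

theorem pvSplitP_ne_nil (p : Char → Bool) (cs : List Char) : pvSplitP p cs ≠ [] := by
  induction cs with
  | nil => simp [pvSplitP]
  | cons c cs ih =>
    simp only [pvSplitP]
    split
    · simp
    · cases h : pvSplitP p cs with
      | nil => exact absurd h ih
      | cons a t => simp [pvMapHead]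

-- str.split with a single-char separator is pvSplitP
theorem splitOn_go_eq (d : Char) :
    ∀ (fuel : Nat) (l cur : List Char) (acc : List (List Char)), l.length ≤ fuel →
      PySem.Chars.splitOn.go [d] fuel l cur acc
        = acc.reverse ++ pvMapHead (cur.reverse ++ ·) (pvSplitP (· == d) l) := by
  intro fuel
  induction fuel with
  | zero =>
    intro l cur acc h
    have : l = [] := by cases l <;> simp_all
    subst this
    simp [PySem.Chars.splitOn.go, pvSplitP, pvMapHead]
  | succ n ih =>
    intro l cur acc h
    cases l with
    | nil => simp [PySem.Chars.splitOn.go, pvSplitP, pvMapHead]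
    | cons c rest =>
      rw [PySem.Chars.splitOn.go]
      by_cases hc : c = d
      · subst hc
        have hp : [c].isPrefixOf (c :: rest) = true := by simp [List.isPrefixOf]
        simp only [hp, if_true, List.drop_succ_cons, List.drop_zero, List.length_cons, List.length_nil] at *
        rw [ih rest [] (cur.reverse :: acc) (by omega)]
        simp [pvSplitP, pvMapHead]
        cases pvSplitP (fun x => x == c) rest <;> rfl
      · have hp : [d].isPrefixOf (c :: rest) = false := by
          simp [List.isPrefixOf]; exact fun hh => absurd hh.symm hc
        simp only [hp, Bool.false_eq_true, if_false]
        rw [ih rest (c :: cur) acc (by simpa using Nat.le_of_succ_le_succ h)]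
        have hne : c = d ↔ False := by simp [hc]
        simp only [pvSplitP, beq_iff_eq, hne, if_false]
        cases hs : pvSplitP (· == d) rest <;> simp [pvMapHead]

theorem splitOn_eq_splitP (cs : List Char) (d : Char) :
    PySem.Chars.splitOn cs [d] = pvSplitP (· == d) cs := by
  rw [PySem.Chars.splitOn, splitOn_go_eq d (cs.length + 1) cs [] [] (by omega)]
  cases h : pvSplitP (· == d) cs with
  | nil => exact absurd h (pvSplitP_ne_nil _ _)
  | cons a t => simp [pvMapHead]

-- flattening a second single-char split over a first one is one split on either delimiter
theorem flatten_splitP (p q : Char → Bool) (cs : List Char) :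
    ((pvSplitP p cs).map (pvSplitP q)).flatten = pvSplitP (fun c => p c || q c) cs := by
  induction cs with
  | nil => simp [pvSplitP]
  | cons c cs ih =>
    by_cases hp : p c = true
    · simp only [pvSplitP, hp, Bool.true_or, if_true, List.map_cons, List.flatten_cons]
      rw [← ih]
      simp [pvSplitP]
    · obtain ⟨h, t, hs⟩ : ∃ h t, pvSplitP p cs = h :: t := by
        cases hh : pvSplitP p cs with
        | nil => exact absurd hh (pvSplitP_ne_nil _ _)
        | cons a t => exact ⟨a, t, rfl⟩
      simp only [pvSplitP, hp, Bool.false_eq_true, if_false, hs, pvMapHead, List.map_cons,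
        List.flatten_cons, Bool.false_or]
      by_cases hq : q c = true
      · simp only [hq, if_true]
        rw [← ih, hs]
        simp [List.map_cons, List.flatten_cons]
      · simp only [hq, Bool.false_eq_true, if_false]
        rw [← ih, hs]
        simp only [List.map_cons, List.flatten_cons]
        obtain ⟨h2, t2, hs2⟩ : ∃ a b, pvSplitP q h = a :: b := by
          cases hh : pvSplitP q h with
          | nil => exact absurd hh (pvSplitP_ne_nil _ _)
          | cons a b => exact ⟨a, b, rfl⟩
        simp [hs2, pvMapHead]

-- B's scanner fold emits exactly the flushed tokens
theorem scan_eq (cs : List Char) :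
    ∀ (tok : List Char) (out : List String),
    ((cs ++ [',']).foldl (fun (st : List Char × List String) ch =>
      if ch == ',' || ch == ';' then ([], st.2 ++ pvEmitB st.1)
      else (st.1 ++ [ch], st.2)) (tok, out)).2
    = out ++ (pvMapHead (tok ++ ·) (pvSplitP pvDelim cs)).flatMap pvEmitB := by
  induction cs with
  | nil =>
    intro tok out
    simp [pvSplitP, pvMapHead, List.foldl]
  | cons c cs ih =>
    intro tok out
    simp only [List.cons_append, List.foldl_cons]
    by_cases hd : pvDelim c = true
    · have : (c == ',' || c == ';') = true := hd
      simp only [this, if_true]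
      rw [ih [] (out ++ pvEmitB tok)]
      simp only [pvSplitP, hd, if_true, pvMapHead]
      cases hs : pvSplitP pvDelim cs with
      | nil => exact absurd hs (pvSplitP_ne_nil _ _)
      | cons a t => simp [pvMapHead, List.flatMap_cons]
    · have : (c == ',' || c == ';') = false := by simpa [pvDelim] using hd
      simp only [this, Bool.false_eq_true, if_false]
      rw [ih (tok ++ [c]) out]
      simp only [pvSplitP, hd, Bool.false_eq_true, if_false]
      cases hs : pvSplitP pvDelim cs with
      | nil => exact absurd hs (pvSplitP_ne_nil _ _)
      | cons a t => simp [pvMapHead]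

theorem pvOfListBeq (l : List Char) (s : String) : (String.ofList l == s) = (l == s.toList) := by
  rw [Bool.eq_iff_iff, beq_iff_eq, beq_iff_eq]
  constructor
  · intro h; have := congrArg String.toList h; simpa using this
  · intro h; subst h; exact String.ofList_toList

-- A's case-insensitive startswith test equals B's lowered-4-char-slice test
theorem pvCond_eq (piece : List Char) :
    PySem.Chars.startswith (PySem.Chars.lower piece) "for=".toList
      = (PySem.Chars.lower (List.take 4 piece) == "for=".toList) := by
  rw [Bool.eq_iff_iff, PySem.Chars.startswith_iff, beq_iff_eq, List.prefix_iff_eq_take]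
  have hl : ("for=".toList).length = 4 := rfl
  rw [hl]
  simp only [PySem.Chars.lower, List.map_take]
  exact eq_comm

theorem pvLowerChar_eq_iff (x : Char) : PySem.Chars.lowerChar x = '=' ↔ x = '=' := by
  constructor
  · intro h
    unfold PySem.Chars.lowerChar at h
    split at h
    · exfalso
      rename_i hu
      simp only [PySem.Chars.isupper, Bool.and_eq_true, decide_eq_true_eq] at hu
      have h1 : (65 : Nat) ≤ x.toNat := by
        have := hu.1; rw [Char.le_def] at this; exact this
      have h2 : x.toNat ≤ (90 : Nat) := by
        have := hu.2; rw [Char.le_def] at this; exact this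
      have hv : (Char.ofNat (x.toNat + 32)).toNat = x.toNat + 32 := by
        rw [Char.toNat_ofNat, if_pos]
        exact Or.inl (by omega)
      have h61 : x.toNat + 32 = 61 := by
        have := congrArg Char.toNat h
        rw [hv] at this
        exact this
      omega
    · exact h
  · intro h; subst h; decide

theorem pvGoMax_zero (fuel : Nat) (l cur : List Char) (acc : List (List Char)) :
    PySem.Chars.splitOnMax.go ['='] fuel 0 l cur acc = acc.reverse ++ [cur.reverse ++ l] := by
  cases fuel with
  | zero => rw [PySem.Chars.splitOnMax.go]; simp
  | succ n =>
    cases l with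
    | nil =>
      rw [PySem.Chars.splitOnMax.go]
      simp
      omega
    | cons c rest => rw [PySem.Chars.splitOnMax.go]; simp

-- str.split(sep, 1): the scan up to the first separator, then the remainder
theorem pvGoMax_one :
    ∀ (t : List Char) (fuel : Nat) (r cur : List Char) (acc : List (List Char)),
      '=' ∉ t → t.length + 1 + r.length ≤ fuel →
      PySem.Chars.splitOnMax.go ['='] fuel 1 (t ++ '=' :: r) cur acc
        = acc.reverse ++ [cur.reverse ++ t, r] := by
  intro t
  induction t with
  | nil =>
    intro fuel r cur acc _ hf
    cases fuel with
    | zero => simp at hf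
    | succ n =>
      rw [PySem.Chars.splitOnMax.go.eq_def]
      have hp : ['='].isPrefixOf ('=' :: r) = true := by simp [List.isPrefixOf]
      simp only [List.nil_append, hp, if_true, one_ne_zero, if_false]
      rw [pvGoMax_zero]
      simp
  | cons c t ih =>
    intro fuel r cur acc hmem hf
    cases fuel with
    | zero => simp at hf
    | succ n =>
      rw [PySem.Chars.splitOnMax.go.eq_def]
      have hc : c ≠ '=' := by intro h; exact hmem (by simp [h])
      have hp : ['='].isPrefixOf (c :: (t ++ '=' :: r)) = true ↔ False := by
        simp [List.isPrefixOf]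
        exact fun h => absurd h.symm hc
      simp only [List.cons_append, one_ne_zero, if_false]
      rw [if_neg (by simpa using hp)]
      rw [ih n r (c :: cur) acc (fun h => hmem (by simp [h])) (by simp at hf ⊢; omega)]
      simp

-- the two per-token emissions agree on every token
theorem emit_eq (cs : List Char) : pvEmitA (String.ofList cs) = pvEmitB cs := by
  unfold pvEmitA pvEmitB
  simp only [PySem.Str.strip, PySem.Str.lower, PySem.Str.slice, PySem.Str.startswith,
    PySem.Str.splitMax?, String.toList_ofList, PySem.Chars.slice_eq_listSlice]
  rw [PySem.List.slice_to _ (by norm_num), PySem.List.slice_from _ (by norm_num)]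
  have h4 : ((4 : Int)).toNat = 4 := rfl
  rw [h4]
  rw [pvOfListBeq, pvCond_eq]
  by_cases hcond : (PySem.Chars.lower (List.take 4 (PySem.Chars.strip cs)) == "for=".toList) = true
  · simp only [hcond, Bool.not_true, Bool.false_eq_true, if_false, if_true]
    set piece := PySem.Chars.strip cs with hp
    rw [beq_iff_eq] at hcond
    have hlen : 4 ≤ piece.length := by
      have := congrArg List.length hcond
      simp [PySem.Chars.lower] at this
      omega
    rcases hpc : piece with _ | ⟨a, _ | ⟨b, _ | ⟨c, _ | ⟨d, r⟩⟩⟩⟩ <;> rw [hpc] at hlen <;> simp at hlen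
    rw [hpc] at hcond
    have hfor : "for=".toList = ['f', 'o', 'r', '='] := rfl
    rw [hfor] at hcond
    simp only [List.take, PySem.Chars.lower, List.map_cons, List.cons.injEq] at hcond
    obtain ⟨ha, hb, hc, hd, -⟩ := hcond
    have hd' : d = '=' := (pvLowerChar_eq_iff d).mp hd
    have hane : a ≠ '=' := by intro h; rw [h] at ha; exact absurd ha (by decide)
    have hbne : b ≠ '=' := by intro h; rw [h] at hb; exact absurd hb (by decide)
    have hcne : c ≠ '=' := by intro h; rw [h] at hc; exact absurd hc (by decide)
    subst hd'
    have hsm : PySem.Chars.splitMax? (a :: b :: c :: '=' :: r) "=".toList 1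
        = some [[a, b, c], r] := by
      have heq : "=".toList = ['='] := rfl
      rw [heq, PySem.Chars.splitMax?]
      simp only [List.isEmpty_cons, Bool.false_eq_true, if_false]
      rw [PySem.Chars.splitOnMax]
      rw [if_neg (by norm_num)]
      have hone : ((1 : Int)).toNat = 1 := rfl
      rw [hone]
      have := pvGoMax_one [a, b, c] ((a :: b :: c :: '=' :: r).length + 1) r [] []
        (by simp; exact ⟨fun h => hane h.symm, fun h => hbne h.symm, fun h => hcne h.symm⟩)
        (by simp; omega)
      simpa using this
    rw [hsm]
    simp only [Option.map_some, Option.getD_some, List.map_cons, List.map_nil]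
    have hg : PySem.List.pyGet? [String.ofList [a, b, c], String.ofList r] 1
        = some (String.ofList r) := rfl
    rw [hg]
    simp
  · simp only [hcond]
    simp at hcond
    simp [hcond]

-- accumulate-by-append folds are flatMaps
theorem foldl_append_emit {α : Type} (g : α → List String) :
    ∀ (l : List α) (a : List String),
      l.foldl (fun acc x => acc ++ g x) a = a ++ l.flatMap g := by
  intro l
  induction l with
  | nil => simp
  | cons x t ih => intro a; simp [List.foldl_cons, ih, List.flatMap_cons]

-- a nested fold over per-segment lists is the fold over their flattening
theorem nested_foldl_eq_flatten_foldl {α : Type} (f : α → List α)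
    (step : List String → α → List String) :
    ∀ (segs : List α) (acc : List String),
      segs.foldl (fun acc seg => (f seg).foldl step acc) acc
        = ((segs.map f).flatten).foldl step acc := by
  intro segs
  induction segs with
  | nil => simp
  | cons s rest ih => intro acc; simp [List.foldl_cons, List.foldl_append, ih]

theorem pvMapHead_id (l : List (List Char)) : pvMapHead (fun x => x) l = l := by
  cases l <;> simp [pvMapHead]

-- A's port, reduced to one flatMap over the flat char-level token list
theorem portA_flat (value : String) :
    iter_forwarded_ips_py value
      = (pvSplitP pvDelim value.toList).flatMap (fun l => pvEmitA (String.ofList l)) := by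
  have hstep : (fun (acc : List String) (part : String) =>
      let piece := PySem.Str.strip part
      if !(PySem.Str.startswith (PySem.Str.lower piece) "for=") then acc
      else
        let raw := PySem.Str.stripChars
          (PySem.Str.strip ((PySem.List.pyGet?
            ((PySem.Str.splitMax? piece "=" 1).getD []) 1).getD "")) "\""
        acc ++ [raw])
      = fun acc part => acc ++ pvEmitA part := by
    funext acc part
    by_cases h : (PySem.Str.startswith (PySem.Str.lower (PySem.Str.strip part)) "for=") = true
    · simp only [pvEmitA, h, Bool.not_true, Bool.false_eq_true, if_false]
    · simp only [pvEmitA, Bool.not_eq_eq_eq_not, Bool.not_true, h, Bool.not_false, if_true,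
        List.append_nil]

  have hsegs : (PySem.Str.split? value ",").getD []
      = (pvSplitP (· == ',') value.toList).map String.ofList := by
    show (Option.map (fun x => List.map String.ofList x)
      (PySem.Chars.split? value.toList ",".toList)).getD [] = _
    rw [show ",".toList = [','] from rfl, PySem.Chars.split?]
    rw [if_neg (by decide)]
    rw [splitOn_eq_splitP]
    simp
  have hparts : ∀ l : List Char, (PySem.Str.split? (String.ofList l) ";").getD []
      = (pvSplitP (· == ';') l).map String.ofList := by
    intro l
    show (Option.map (fun x => List.map String.ofList x)
      (PySem.Chars.split? (String.ofList l).toList ";".toList)).getD [] = _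
    rw [show ";".toList = [';'] from rfl, PySem.Chars.split?]
    rw [if_neg (by decide)]
    rw [String.toList_ofList, splitOn_eq_splitP]
    simp
  rw [iter_forwarded_ips_py, hstep, hsegs]
  rw [nested_foldl_eq_flatten_foldl (fun seg => (PySem.Str.split? seg ";").getD [])
    (fun acc part => acc ++ pvEmitA part)]
  rw [foldl_append_emit]
  rw [List.map_map]
  have hmapped : ((pvSplitP (· == ',') value.toList).map
        ((fun seg => (PySem.Str.split? seg ";").getD []) ∘ String.ofList))
      = (pvSplitP (· == ',') value.toList).map (fun l => (pvSplitP (· == ';') l).map String.ofList) := by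
    apply List.map_congr_left
    intro l _
    exact hparts l
  rw [hmapped]
  have hfl : ((pvSplitP (· == ',') value.toList).map
        (fun l => (pvSplitP (· == ';') l).map String.ofList)).flatten
      = (((pvSplitP (· == ',') value.toList).map (pvSplitP (· == ';'))).flatten).map String.ofList := by
    rw [List.map_flatten, List.map_map]
    rfl
  rw [hfl, flatten_splitP]
  rw [List.flatMap_map]
  simp only [List.nil_append]
  rfl

-- B's port, reduced to the same flatMap
theorem portB_flat (value : String) :
    iter_forwarded_ips_py_alt value = (pvSplitP pvDelim value.toList).flatMap pvEmitB := by
  have hstep : (fun (st : List Char × List String) (ch : Char) =>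
      if ch == ',' || ch == ';' then
        let piece := PySem.Str.strip (String.ofList st.1)
        ((([] : List Char)),
          if PySem.Str.lower (PySem.Str.slice piece none (some 4)) == "for=" then
            st.2 ++ [PySem.Str.stripChars (PySem.Str.strip (PySem.Str.slice piece (some 4) none)) "\""]
          else st.2)
      else (st.1 ++ [ch], st.2))
      = fun st ch => if ch == ',' || ch == ';' then (([] : List Char), st.2 ++ pvEmitB st.1)
          else (st.1 ++ [ch], st.2) := by
    funext st ch
    by_cases hch : (ch == ',' || ch == ';') = true
    · simp only [hch, if_true]
      unfold pvEmitB
      split <;> simp_all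
    · simp [hch]
  rw [iter_forwarded_ips_py_alt, hstep, scan_eq value.toList [] []]
  simp only [List.nil_append, pvMapHead_id]

-- ===== VERDICT (by name: the statement is the Claim_ definition above) =====
theorem iter_forwarded_ips_py_spec : Claim_equal_iter_forwarded_ips_py := by
  intro value _
  show iter_forwarded_ips_py value = iter_forwarded_ips_py_alt value
  rw [portA_flat, portB_flat]
  have : (fun l => pvEmitA (String.ofList l)) = pvEmitB := by
    funext l; exact emit_eq l
  rw [this]
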